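-- pv_equiv track=rewrite | github.com/90sidort/exercises_Python | triple_Touble.py | triple_double
-- ===== SOURCE A (Python) =====
-- def triple_double(num1, num2):
--     lst1 = list(str(num1))
--     num2 = str(num2)
--     for i in range(len(lst1)-2):
--         if len(set(lst1[i:i+3])) == 1:
--             double = 2 * str(lst1[i])
--             if double in num2:
--                 return 1
--     return 0
-- ===== SOURCE B (Python) =====
-- def triple_double(num1, num2):
--     s1, s2 = str(num1), str(num2)
--     for d in "0123456789":
--         if d * 3 in s1 and d * 2 in s2:
--             return 1
--     return 0
-- ===== Notes on version B (the rewrite author's own statement) =====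
-- stated objective: simpler
-- what changed: B indexes by the ten digit characters and tests substring membership d*3 in str(num1) and d*2 in str(num2), instead of A's scan over every 3-char window of str(num1) building a set per window.
import Mathlib
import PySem

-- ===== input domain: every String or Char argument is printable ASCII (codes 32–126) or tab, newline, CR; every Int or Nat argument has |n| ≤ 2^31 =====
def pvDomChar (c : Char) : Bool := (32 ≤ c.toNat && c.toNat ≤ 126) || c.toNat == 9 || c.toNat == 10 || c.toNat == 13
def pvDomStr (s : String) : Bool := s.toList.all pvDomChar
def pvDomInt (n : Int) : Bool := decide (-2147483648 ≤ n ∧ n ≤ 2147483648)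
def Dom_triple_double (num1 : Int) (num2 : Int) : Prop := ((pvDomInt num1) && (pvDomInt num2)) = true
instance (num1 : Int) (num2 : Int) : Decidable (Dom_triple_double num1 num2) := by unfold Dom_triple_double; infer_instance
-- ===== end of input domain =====

-- B indexes by the ten digit characters and tests 'd*3 in str(num1) and d*2 in str(num2)' instead of A's scan over 3-char windows with a set per window; objective: simpler.

-- ===== PORT A =====
-- the 'for i in range(len(lst1)-2)' loop with early return 1
def tdA_loop (lst1 s2 : List Char) : List Nat → Int
  | [] => 0
  | i :: rest =>
      if (PySem.Set.ofList (PySem.List.slice lst1 (some (i : Int)) (some ((i : Int) + 3)))).length = 1 then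
        if PySem.Chars.isIn [PySem.List.pyGetD lst1 (i : Int) ' ', PySem.List.pyGetD lst1 (i : Int) ' '] s2 then 1
        else tdA_loop lst1 s2 rest
      else tdA_loop lst1 s2 rest

def triple_double (num1 : Int) (num2 : Int) : Int :=
  let lst1 := PySem.Int.toChars num1
  let s2 := PySem.Int.toChars num2
  tdA_loop lst1 s2 (List.range (lst1.length - 2))

-- ===== PORT B =====
-- the 'for d in "0123456789"' loop with early return 1
def tdB_loop (s1 s2 : List Char) : List Char → Int
  | [] => 0
  | d :: rest =>
      if PySem.Chars.isIn [d, d, d] s1 && PySem.Chars.isIn [d, d] s2 then 1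
      else tdB_loop s1 s2 rest

def triple_double_alt (num1 : Int) (num2 : Int) : Int :=
  tdB_loop (PySem.Int.toChars num1) (PySem.Int.toChars num2) "0123456789".toList

-- ===== PRECONDITION & SPEC =====
def Spec_triple_double (num1 : Int) (num2 : Int) (out : Int) : Prop := out = triple_double_alt num1 num2
instance (num1 : Int) (num2 : Int) (out : Int) : Decidable (Spec_triple_double num1 num2 out) := by unfold Spec_triple_double; infer_instance

-- ===== CLAIM (what is proved, stated in full; the proofs are below) =====
def Claim_equal_triple_double : Prop := ∀ (num1 : Int) (num2 : Int), Dom_triple_double num1 num2 → Spec_triple_double num1 num2 (triple_double num1 num2)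

-- ===== LEMMAS AND PROOFS =====

-- A's per-index test, as a Bool predicate
def pA (lst1 s2 : List Char) (i : Nat) : Bool :=
  decide ((PySem.Set.ofList (PySem.List.slice lst1 (some (i : Int)) (some ((i : Int) + 3)))).length = 1)
    && PySem.Chars.isIn [PySem.List.pyGetD lst1 (i : Int) ' ', PySem.List.pyGetD lst1 (i : Int) ' '] s2

-- B's per-digit test, as a Bool predicate
def qB (s1 s2 : List Char) (d : Char) : Bool :=
  PySem.Chars.isIn [d, d, d] s1 && PySem.Chars.isIn [d, d] s2

theorem tdA_loop_eq_any (lst1 s2 : List Char) (idxs : List Nat) :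
    tdA_loop lst1 s2 idxs = if idxs.any (pA lst1 s2) then 1 else 0 := by
  induction idxs with
  | nil => rfl
  | cons i rest ih =>
      simp only [tdA_loop, List.any_cons]
      by_cases h1 : (PySem.Set.ofList (PySem.List.slice lst1 (some (i : Int)) (some ((i : Int) + 3)))).length = 1
      · cases h2 : PySem.Chars.isIn [PySem.List.pyGetD lst1 (i : Int) ' ', PySem.List.pyGetD lst1 (i : Int) ' '] s2 with
        | true =>
            simp [PySem.List.pyGetD_natCast, List.getD] at h2
            simp [pA, h1, h2]
        | false =>
            simp [PySem.List.pyGetD_natCast, List.getD] at h2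
            simp [pA, h1, h2, ih]
      · simp [pA, h1, ih]

theorem tdB_loop_eq_any (s1 s2 : List Char) (ds : List Char) :
    tdB_loop s1 s2 ds = if ds.any (qB s1 s2) then 1 else 0 := by
  induction ds with
  | nil => rfl
  | cons d rest ih =>
      simp only [tdB_loop, List.any_cons]
      cases h1 : (PySem.Chars.isIn [d, d, d] s1 && PySem.Chars.isIn [d, d] s2) with
      | true => simp [qB, h1]
      | false => simp [qB, h1, ih]

theorem digitChar_mem (m : Nat) (hm : m < 10) : m.digitChar ∈ "0123456789".toList := by
  interval_cases m <;> decide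

theorem mem_toDigitsCore (fuel : Nat) : ∀ (n : Nat) (ds : List Char) (c : Char),
    c ∈ Nat.toDigitsCore 10 fuel n ds → c ∈ ds ∨ c ∈ "0123456789".toList := by
  induction fuel with
  | zero => intro n ds c h; exact Or.inl h
  | succ fuel ih =>
      intro n ds c h
      rw [Nat.toDigitsCore] at h
      by_cases hz : n / 10 = 0
      · simp only [hz] at h
        rcases List.mem_cons.mp h with h | h
        · exact Or.inr (h ▸ digitChar_mem _ (Nat.mod_lt _ (by norm_num)))
        · exact Or.inl h
      · simp only [if_neg hz] at h
        rcases ih _ _ _ h with h' | h'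
        · rcases List.mem_cons.mp h' with h'' | h''
          · exact Or.inr (h'' ▸ digitChar_mem _ (Nat.mod_lt _ (by norm_num)))
          · exact Or.inl h''
        · exact Or.inr h'

theorem mem_toDigits (n : Nat) (c : Char) (h : c ∈ Nat.toDigits 10 n) :
    c ∈ "0123456789".toList := by
  rcases mem_toDigitsCore (n + 1) n [] c h with h' | h'
  · simp at h'
  · exact h'

-- a char forming a run of three in str(num) is a digit (the '-' sign occurs at most once, at the front)
theorem triple_infix_digit (n : Int) (c : Char)
    (h : [c, c, c] <:+: PySem.Int.toChars n) : c ∈ "0123456789".toList := by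
  rcases h with ⟨pre, suf, hps⟩
  unfold PySem.Int.toChars at hps
  split at hps
  · cases pre with
    | nil =>
        apply mem_toDigits n.natAbs
        have h1 : c :: c :: c :: suf = '-' :: Nat.toDigits 10 n.natAbs := by simpa using hps
        injection h1 with _ h2
        rw [← h2]; simp
    | cons a pre' =>
        apply mem_toDigits n.natAbs
        have h1 : a :: (pre' ++ [c, c, c] ++ suf) = '-' :: Nat.toDigits 10 n.natAbs := by
          simpa using hps
        injection h1 with _ h2
        rw [← h2]; simp
  · apply mem_toDigits n.toNat
    rw [← hps]; simp

-- Set.ofList of a 3-list has one element iff all three entries are equal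
theorem set3_len (a b c : Char) :
    (PySem.Set.ofList [a, b, c]).length = 1 ↔ a = b ∧ a = c := by
  by_cases hab : a = b <;> by_cases hac : a = c <;> by_cases hbc : b = c <;>
    simp [PySem.Set.ofList, PySem.Set.add, PySem.Set.contains, hab, hac, hbc] <;>
    subst_eqs <;> simp_all [eq_comm]

-- the central existence equivalence
theorem any_eq (num1 : Int) (s2 : List Char) :
    (List.range ((PySem.Int.toChars num1).length - 2)).any (pA (PySem.Int.toChars num1) s2)
      = ("0123456789".toList).any (qB (PySem.Int.toChars num1) s2) := by
  set s1 := PySem.Int.toChars num1 with hs1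
  rw [Bool.eq_iff_iff]
  simp only [List.any_eq_true, List.mem_range]
  constructor
  · rintro ⟨i, hi, hp⟩
    have hlen : i + 3 ≤ s1.length := by omega
    simp only [pA, Bool.and_eq_true, decide_eq_true_eq] at hp
    obtain ⟨hset, hin2⟩ := hp
    have hcast : ((i : Int) + 3) = ((i + 3 : Nat) : Int) := by push_cast; ring
    rw [hcast, PySem.List.slice_natCast] at hset
    have h3 : i + 3 - i = 3 := by omega
    rw [h3] at hset
    -- the window is a 3-element list
    have hwl : ((s1.drop i).take 3).length = 3 := by
      simp [List.length_take, List.length_drop]; omega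
    obtain ⟨x, y, z, hxyz⟩ : ∃ x y z, (s1.drop i).take 3 = [x, y, z] := by
      match hw : (s1.drop i).take 3 with
      | [x, y, z] => exact ⟨x, y, z, rfl⟩
      | [] | [_] | [_, _] | _ :: _ :: _ :: _ :: _ => simp [hw] at hwl
    rw [hxyz, set3_len] at hset
    obtain ⟨hxy, hxz⟩ := hset
    have hdrop : s1.drop i = [x, y, z] ++ (s1.drop i).drop 3 := by
      conv_lhs => rw [← List.take_append_drop 3 (s1.drop i)]
      rw [hxyz]
    have hget : s1[i]? = some x := by
      have h0 : (s1.drop i)[0]? = s1[i + 0]? := List.getElem?_drop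
      rw [hdrop] at h0
      simpa using h0.symm
    have hgd : PySem.List.pyGetD s1 (i : Int) ' ' = x := by
      rw [PySem.List.pyGetD_natCast, List.getD, hget]; rfl
    rw [hgd] at hin2
    refine ⟨x, ?_, ?_⟩
    · apply triple_infix_digit num1
      rw [← hs1]
      exact ⟨s1.take i, (s1.drop i).drop 3, by
        subst hxy hxz
        conv_rhs => rw [← List.take_append_drop i s1, hdrop]
        simp⟩
    · simp only [qB, Bool.and_eq_true]
      refine ⟨?_, hin2⟩
      rw [PySem.Chars.isIn_iff_infix]
      exact ⟨s1.take i, (s1.drop i).drop 3, by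
        subst hxy hxz
        conv_rhs => rw [← List.take_append_drop i s1, hdrop]
        simp⟩
  · rintro ⟨d, hd, hq⟩
    simp only [qB, Bool.and_eq_true] at hq
    obtain ⟨hin1, hin2⟩ := hq
    rw [PySem.Chars.isIn_iff_infix] at hin1
    rcases hin1 with ⟨pre, suf, hps⟩
    refine ⟨pre.length, ?_, ?_⟩
    · have : s1.length = pre.length + 3 + suf.length := by
        rw [← hps]; simp; omega
      omega
    · simp only [pA, Bool.and_eq_true, decide_eq_true_eq]
      have hcast : ((pre.length : Int) + 3) = ((pre.length + 3 : Nat) : Int) := by push_cast; ring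
      have hdrop : s1.drop pre.length = [d, d, d] ++ suf := by
        rw [← hps, List.append_assoc, List.drop_left]
      have hget : s1[pre.length]? = some d := by
        have h0 : (s1.drop pre.length)[0]? = s1[pre.length + 0]? := List.getElem?_drop
        rw [hdrop] at h0
        simpa using h0.symm
      have hgd : PySem.List.pyGetD s1 (pre.length : Int) ' ' = d := by
        rw [PySem.List.pyGetD_natCast, List.getD, hget]; rfl
      refine ⟨?_, by rw [hgd]; exact hin2⟩
      rw [hcast, PySem.List.slice_natCast]
      have h3 : pre.length + 3 - pre.length = 3 := by omega
      rw [h3, hdrop]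
      simp [set3_len]

-- ===== VERDICT (by name: the statement is the Claim_ definition above) =====
theorem triple_double_spec : Claim_equal_triple_double := by
  intro num1 num2 _
  unfold Spec_triple_double triple_double triple_double_alt
  simp only [tdA_loop_eq_any, tdB_loop_eq_any]
  rw [any_eq]
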